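-- pv_equiv track=rewrite | github.com/PLIAN78/MacroHRL | step1_train_subs_v2.py | extract_episodes
-- ===== SOURCE A (Python) =====
-- MIN_EPISODE_LEN = 5       # minimum consecutive days to form an episode
--
-- def extract_episodes(ret_data, regime_labels, target_regime, min_len=MIN_EPISODE_LEN):
--     """Extract list of contiguous day-blocks where regime == target_regime."""
--     episodes = []
--     in_ep = False
--     start = 0
--     for i, r in enumerate(regime_labels):
--         if r == target_regime and not in_ep:
--             start = i
--             in_ep = True
--         elif r != target_regime and in_ep:
--             if i - start >= min_len:
--                 episodes.append(ret_data[start:i])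
--             in_ep = False
--     if in_ep and len(regime_labels) - start >= min_len:
--         episodes.append(ret_data[start:len(regime_labels)])
--     return episodes
-- ===== SOURCE B (Python) =====
-- MIN_EPISODE_LEN = 5
--
--
-- def extract_episodes(ret_data, regime_labels, target_regime, min_len=MIN_EPISODE_LEN):
--     """Extract list of contiguous day-blocks where regime == target_regime.
--
--     Two-pointer run scan: advance j to the end of each maximal run of equal
--     labels, emit the block directly if it is a long-enough target run.
--     No in_ep flag, no mid-loop close logic, no post-loop flush.
--     """
--     episodes = []
--     i, n = 0, len(regime_labels)
--     while i < n:
--         j = i + 1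
--         while j < n and regime_labels[j] == regime_labels[i]:
--             j += 1
--         if regime_labels[i] == target_regime and j - i >= min_len:
--             episodes.append(ret_data[i:j])
--         i = j
--     return episodes
-- ===== Notes on version B (the rewrite author's own statement) =====
-- stated objective: simpler
-- what changed: Replaces A's in_ep flag state machine with segment-close logic inside the loop plus a post-loop flush by a direct two-pointer scan over maximal runs of equal labels, emitting each qualifying target run immediately.
import Mathlib
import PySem

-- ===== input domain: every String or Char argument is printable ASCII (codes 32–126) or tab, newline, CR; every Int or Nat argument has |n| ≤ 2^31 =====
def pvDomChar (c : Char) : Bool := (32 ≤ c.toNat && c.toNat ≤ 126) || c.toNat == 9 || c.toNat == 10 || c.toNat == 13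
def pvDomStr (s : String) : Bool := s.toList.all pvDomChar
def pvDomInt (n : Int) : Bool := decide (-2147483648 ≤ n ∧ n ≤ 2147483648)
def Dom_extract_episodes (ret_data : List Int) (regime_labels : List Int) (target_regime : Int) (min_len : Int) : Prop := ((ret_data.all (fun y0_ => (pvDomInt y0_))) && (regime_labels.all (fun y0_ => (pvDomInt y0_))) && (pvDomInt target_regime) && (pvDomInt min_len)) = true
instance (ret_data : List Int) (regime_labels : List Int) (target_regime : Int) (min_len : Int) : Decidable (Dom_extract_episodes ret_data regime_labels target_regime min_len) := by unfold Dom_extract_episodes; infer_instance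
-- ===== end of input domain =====

-- B replaces A's in_ep-flag state machine (with its mid-loop close and post-loop flush)
-- by a direct two-pointer scan over maximal runs of equal labels; same O(n) cost, simpler control flow.

-- ===== PORT A =====
-- A's loop over enumerate(regime_labels) with state (episodes, in_ep, start); n = len(regime_labels)
def pvALoop (ret_data : List Int) (target_regime min_len : Int) (n : Nat) :
    List Int → Nat → List (List Int) → Bool → Nat → List (List Int)
  | [], _, episodes, in_ep, start =>
      -- post-loop flush: if in_ep and len(regime_labels) - start >= min_len
      if in_ep = true ∧ min_len ≤ (n : Int) - (start : Int) then
        episodes ++ [PySem.List.slice ret_data (some (start : Int)) (some (n : Int))]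
      else episodes
  | r :: rest, i, episodes, in_ep, start =>
      if r = target_regime ∧ in_ep = false then
        pvALoop ret_data target_regime min_len n rest (i + 1) episodes true i
      else if r ≠ target_regime ∧ in_ep = true then
        pvALoop ret_data target_regime min_len n rest (i + 1)
          (if min_len ≤ (i : Int) - (start : Int) then
            episodes ++ [PySem.List.slice ret_data (some (start : Int)) (some (i : Int))]
          else episodes)
          false start
      else
        pvALoop ret_data target_regime min_len n rest (i + 1) episodes in_ep start

def extract_episodes (ret_data : List Int) (regime_labels : List Int) (target_regime : Int) (min_len : Int) : List (List Int) :=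
  pvALoop ret_data target_regime min_len regime_labels.length regime_labels 0 [] false 0

-- ===== PORT B =====
-- B's outer while i < n: j runs to the end of the maximal run of labels equal to regime_labels[i]
-- (the inner while is the takeWhile/dropWhile split of the remaining labels); emit ret_data[i:j] if it qualifies.
def pvBScan (ret_data : List Int) (target_regime min_len : Int) : Nat → List Int → List (List Int)
  | _, [] => []
  | i, x :: xs =>
      let j := i + 1 + (xs.takeWhile (· = x)).length
      (if x = target_regime ∧ min_len ≤ (j : Int) - (i : Int) then
        [PySem.List.slice ret_data (some (i : Int)) (some (j : Int))]
      else []) ++ pvBScan ret_data target_regime min_len j (xs.dropWhile (· = x))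
termination_by _ ls => ls.length
decreasing_by
  simp only [List.length_cons]
  exact Nat.lt_succ_of_le (List.length_dropWhile_le _ _)

def extract_episodes_alt (ret_data : List Int) (regime_labels : List Int) (target_regime : Int) (min_len : Int) : List (List Int) :=
  pvBScan ret_data target_regime min_len 0 regime_labels

-- ===== PRECONDITION & SPEC =====
def Spec_extract_episodes (ret_data : List Int) (regime_labels : List Int) (target_regime : Int) (min_len : Int) (out : List (List Int)) : Prop := out = extract_episodes_alt ret_data regime_labels target_regime min_len
instance (ret_data : List Int) (regime_labels : List Int) (target_regime : Int) (min_len : Int) (out : List (List Int)) : Decidable (Spec_extract_episodes ret_data regime_labels target_regime min_len out) := by unfold Spec_extract_episodes; infer_instance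

-- ===== CLAIM (what is proved, stated in full; the proofs are below) =====
def Claim_equal_extract_episodes : Prop := ∀ (ret_data : List Int) (regime_labels : List Int) (target_regime : Int) (min_len : Int), Dom_extract_episodes ret_data regime_labels target_regime min_len → Spec_extract_episodes ret_data regime_labels target_regime min_len (extract_episodes ret_data regime_labels target_regime min_len)

-- ===== LEMMAS AND PROOFS =====

-- A's loop ignores non-target labels while in_ep = false
lemma pvALoop_skip_false (rd : List Int) (tgt ml : Int) (n : Nat) (pre : List Int)
    (hpre : ∀ a ∈ pre, a ≠ tgt) :
    ∀ (rest : List Int) (i : Nat) (eps : List (List Int)) (s : Nat),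
      pvALoop rd tgt ml n (pre ++ rest) i eps false s =
      pvALoop rd tgt ml n rest (i + pre.length) eps false s := by
  induction pre with
  | nil => intro rest i eps s; simp
  | cons a as ih =>
      intro rest i eps s
      have ha : a ≠ tgt := hpre a (by simp)
      rw [List.cons_append, pvALoop]
      simp only [ha, false_and, if_false, Bool.false_eq_true, and_false, if_false]
      rw [ih (fun b hb => hpre b (by simp [hb]))]
      congr 1
      simp [List.length_cons]; omega

-- A's loop ignores target labels while in_ep = true
lemma pvALoop_skip_true (rd : List Int) (tgt ml : Int) (n : Nat) (pre : List Int)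
    (hpre : ∀ a ∈ pre, a = tgt) :
    ∀ (rest : List Int) (i : Nat) (eps : List (List Int)) (s : Nat),
      pvALoop rd tgt ml n (pre ++ rest) i eps true s =
      pvALoop rd tgt ml n rest (i + pre.length) eps true s := by
  induction pre with
  | nil => intro rest i eps s; simp
  | cons a as ih =>
      intro rest i eps s
      have ha : a = tgt := hpre a (by simp)
      rw [List.cons_append, pvALoop]
      simp only [ha, Bool.true_eq_false, and_false, if_false, ne_eq, not_true_eq_false,
        false_and, if_false]
      rw [ih (fun b hb => hpre b (by simp [hb]))]
      congr 1
      simp [List.length_cons]; omega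

-- B's scan may consume one non-target label at a time
lemma pvBScan_peel (rd : List Int) (tgt ml : Int) (d : Int) (ds : List Int) (j : Nat)
    (hd : d ≠ tgt) :
    pvBScan rd tgt ml j (d :: ds) = pvBScan rd tgt ml (j + 1) ds := by
  rw [pvBScan]
  simp only [hd, false_and, if_false, List.nil_append]
  cases ds with
  | nil => simp [pvBScan]
  | cons e es =>
      by_cases he : e = d
      · subst he
        rw [pvBScan]
        simp only [hd, false_and, if_false, List.nil_append, List.takeWhile_cons,
          List.dropWhile_cons, decide_true, if_true]
        congr 1
        simp [List.length_cons]; omega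
      · simp [he]

-- one-step unfolding of pvBScan on a nonempty list (the let written out)
lemma pvBScan_cons (rd : List Int) (tgt ml : Int) (i : Nat) (x : Int) (xs : List Int) :
    pvBScan rd tgt ml i (x :: xs) =
      (if x = tgt ∧ ml ≤ ((i + 1 + (xs.takeWhile (· = x)).length : Nat) : Int) - (i : Int) then
        [PySem.List.slice rd (some (i : Int)) (some ((i + 1 + (xs.takeWhile (· = x)).length : Nat) : Int))]
      else []) ++ pvBScan rd tgt ml (i + 1 + (xs.takeWhile (· = x)).length) (xs.dropWhile (· = x)) := by
  rw [pvBScan]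

-- main invariant: from in_ep = false, A's loop appends exactly what B's run scan emits
lemma pvALoop_eq_pvBScan (rd : List Int) (tgt ml : Int) (n : Nat) :
    ∀ (k : Nat) (ls : List Int), ls.length ≤ k → ∀ (i : Nat), i + ls.length = n →
      ∀ (eps : List (List Int)) (s : Nat),
      pvALoop rd tgt ml n ls i eps false s = eps ++ pvBScan rd tgt ml i ls := by
  intro k
  induction k with
  | zero =>
      intro ls hls i hi eps s
      have : ls = [] := List.eq_nil_of_length_eq_zero (Nat.le_zero.mp hls)
      subst this
      simp [pvALoop, pvBScan]
  | succ k ih =>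
      intro ls hls i hi eps s
      cases ls with
      | nil => simp [pvALoop, pvBScan]
      | cons x xs =>
          have hsplit : xs.takeWhile (· = x) ++ xs.dropWhile (· = x) = xs :=
            List.takeWhile_append_dropWhile
          have hpretgt : ∀ a ∈ xs.takeWhile (· = x), a = x := by
            intro a ha
            have := List.mem_takeWhile_imp ha; simpa using this
          have hlen := congrArg List.length hsplit
          rw [List.length_append] at hlen
          simp only [List.length_cons] at hls hi
          by_cases hx : x = tgt
          · -- x is the target: A opens an episode, runs through the target run
            have hskip : pvALoop rd tgt ml n xs (i + 1) eps true i =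
                pvALoop rd tgt ml n (xs.dropWhile (· = x))
                  (i + 1 + (xs.takeWhile (· = x)).length) eps true i := by
              conv_lhs => rw [← hsplit]
              exact pvALoop_skip_true rd tgt ml n _
                (fun a ha => (hpretgt a ha).trans hx) _ _ _ _
            rw [pvALoop, if_pos ⟨hx, rfl⟩, hskip, pvBScan_cons]
            cases hsuf : xs.dropWhile (· = x) with
            | nil =>
                rw [hsuf] at hlen
                simp only [List.length_nil] at hlen
                have hn : n = i + 1 + (xs.takeWhile (· = x)).length := by omega
                simp only [pvALoop, pvBScan, List.append_nil]
                rw [hn]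
                simp only [hx, true_and]
                split_ifs <;> simp
            | cons d ds =>
                have hdx : ¬ (d = x) := by
                  have h2 := List.head_dropWhile_not (fun a => decide (a = x)) (l := xs)
                    (by simp [hsuf])
                  simpa [hsuf] using h2
                have hd : d ≠ tgt := by rw [← hx]; exact hdx
                rw [hsuf] at hlen
                simp only [List.length_cons] at hlen
                rw [pvALoop, if_neg (by simp [hd]), if_pos ⟨hd, rfl⟩]
                have hds : ds.length ≤ k := by omega
                have hids : (i + 1 + (xs.takeWhile (· = x)).length + 1) + ds.length = n := by
                  omega
                rw [ih ds hds _ hids, pvBScan_peel rd tgt ml d ds _ hd]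
                simp only [hx, true_and]
                split_ifs <;> simp
          · -- x is not the target: both sides skip the whole run
            rw [pvALoop, if_neg (by simp [hx]), if_neg (by simp)]
            have hskip : pvALoop rd tgt ml n xs (i + 1) eps false s =
                pvALoop rd tgt ml n (xs.dropWhile (· = x))
                  (i + 1 + (xs.takeWhile (· = x)).length) eps false s := by
              conv_lhs => rw [← hsplit]
              exact pvALoop_skip_false rd tgt ml n _
                (fun a ha => by rw [hpretgt a ha]; exact hx) _ _ _ _
            rw [hskip]
            have hsl : (xs.dropWhile (· = x)).length ≤ k := by omega
            have his : (i + 1 + (xs.takeWhile (· = x)).length) + (xs.dropWhile (· = x)).length = n := by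
              omega
            rw [ih _ hsl _ his, pvBScan_cons]
            simp [hx]

-- ===== VERDICT (by name: the statement is the Claim_ definition above) =====
theorem extract_episodes_spec : Claim_equal_extract_episodes := by
  intro rd labels tgt ml _
  unfold Spec_extract_episodes extract_episodes extract_episodes_alt
  simpa using pvALoop_eq_pvBScan rd tgt ml labels.length labels.length labels le_rfl 0 (by simp) [] 0
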